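-- pv_equiv track=rewrite | github.com/JackR7-dev/s.n.a.p | prompt_reader.py | modify_random_prompt
-- ===== SOURCE A (Python) =====
-- def modify_random_prompt(random_prompt):
--     modified_prompt = []
--     capitalize_next = True
--     index = 0
--
--     for char in random_prompt:
--         if char == '\n':
--              capitalize_next = True
--
--         if capitalize_next and char.isalpha():
--               modified_prompt.append(char.upper())
--               capitalize_next = False
--               index += 1
--         else:
--             modified_prompt.append(char)
--             index += 1
--     return ''.join(modified_prompt)
-- ===== SOURCE B (Python) =====
-- def _cap_first(seg):
--     for k, ch in enumerate(seg):
--         if ch.isalpha():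
--             return seg[:k] + ch.upper() + seg[k+1:]
--     return seg
--
--
-- def modify_random_prompt(random_prompt):
--     return '\n'.join(_cap_first(seg) for seg in random_prompt.split('\n'))
-- ===== Notes on version B (the rewrite author's own statement) =====
-- stated objective: faster
-- what changed: Replaces the flag-carrying per-character loop by split-on-newline, uppercase the first alphabetic character of each segment, and re-join; the dead index counter and the carried capitalize_next flag disappear.
import Mathlib
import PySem

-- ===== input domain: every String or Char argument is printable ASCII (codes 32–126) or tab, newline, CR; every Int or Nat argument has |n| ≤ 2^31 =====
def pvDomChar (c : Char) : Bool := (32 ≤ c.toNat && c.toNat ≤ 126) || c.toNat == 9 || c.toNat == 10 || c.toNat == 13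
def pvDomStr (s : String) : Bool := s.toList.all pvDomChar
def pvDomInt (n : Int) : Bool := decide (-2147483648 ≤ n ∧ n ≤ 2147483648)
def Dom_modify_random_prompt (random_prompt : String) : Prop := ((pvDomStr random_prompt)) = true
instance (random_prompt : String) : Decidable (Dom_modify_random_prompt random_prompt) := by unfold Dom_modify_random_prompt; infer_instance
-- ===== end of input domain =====

-- B replaces A's flag-carrying character loop by split-on-newline / uppercase-first-alpha-per-segment / join (same O(n), measured faster via C-level split/join).

-- ===== PORT A =====
def modify_random_prompt (random_prompt : String) : String :=
  let r :=
    random_prompt.toList.foldl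
      (fun (st : List Char × Bool) char =>
        let capitalize_next := if char = '\n' then true else st.2
        if capitalize_next && PySem.Chars.isalpha char then
          (st.1 ++ [PySem.Chars.upperChar char], false)
        else
          (st.1 ++ [char], capitalize_next))
      ([], true)
  String.mk r.1

-- ===== PORT B =====
-- _cap_first: 'for k, ch in enumerate(seg): if ch.isalpha(): return seg[:k] + ch.upper() + seg[k+1:]; return seg'
def pvCapGo (seg : List Char) : List (Int × Char) → List Char
  | [] => seg
  | (k, ch) :: rest =>
      if PySem.Chars.isalpha ch then
        PySem.List.slice seg none (some k) ++ [PySem.Chars.upperChar ch] ++ PySem.List.slice seg (some (k + 1)) none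
      else pvCapGo seg rest

def pvCapFirst (seg : List Char) : List Char := pvCapGo seg (PySem.List.enumerate seg 0)

def modify_random_prompt_alt (random_prompt : String) : String :=
  String.mk (PySem.Chars.join ['\n'] ((PySem.Chars.splitOn random_prompt.toList ['\n']).map pvCapFirst))

-- ===== PRECONDITION & SPEC =====
def Spec_modify_random_prompt (random_prompt : String) (out : String) : Prop := out = modify_random_prompt_alt random_prompt
instance (random_prompt : String) (out : String) : Decidable (Spec_modify_random_prompt random_prompt out) := by unfold Spec_modify_random_prompt; infer_instance

-- ===== CLAIM (what is proved, stated in full; the proofs are below) =====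
def Claim_equal_modify_random_prompt : Prop := ∀ (random_prompt : String), Dom_modify_random_prompt random_prompt → Spec_modify_random_prompt random_prompt (modify_random_prompt random_prompt)

-- ===== LEMMAS AND PROOFS =====

-- structural split on '\n': (first piece, remaining pieces)
def pvSplit1 : List Char → List Char × List (List Char)
  | [] => ([], [])
  | c :: r =>
      if c = '\n' then ([], (pvSplit1 r).1 :: (pvSplit1 r).2)
      else (c :: (pvSplit1 r).1, (pvSplit1 r).2)

-- structural "uppercase first alphabetic char"
def pvCapS : List Char → List Char
  | [] => []
  | c :: r => if PySem.Chars.isalpha c then PySem.Chars.upperChar c :: r else c :: pvCapS r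

-- structural form of A's loop
def pvACap : List Char → Bool → List Char
  | [], _ => []
  | c :: r, cap =>
      let cap' := if c = '\n' then true else cap
      if cap' && PySem.Chars.isalpha c then PySem.Chars.upperChar c :: pvACap r false
      else c :: pvACap r cap'

theorem pvFoldl_eq_pvACap (cs : List Char) (acc : List Char) (cap : Bool) :
    (cs.foldl
      (fun (st : List Char × Bool) char =>
        let capitalize_next := if char = '\n' then true else st.2
        if capitalize_next && PySem.Chars.isalpha char then
          (st.1 ++ [PySem.Chars.upperChar char], false)
        else
          (st.1 ++ [char], capitalize_next))
      (acc, cap)).1 = acc ++ pvACap cs cap := by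
  induction cs generalizing acc cap with
  | nil => simp [pvACap]
  | cons c r ih =>
      simp only [List.foldl_cons, pvACap]
      by_cases h : ((if c = '\n' then true else cap) && PySem.Chars.isalpha c) = true
      · rw [if_pos h, if_pos h, ih]
        simp
      · rw [if_neg h, if_neg h, ih]
        simp

theorem pvSplitOnGo_eq (cs : List Char) : ∀ (fuel : Nat) (cur : List Char) (acc : List (List Char)),
    cs.length < fuel →
    PySem.Chars.splitOn.go ['\n'] fuel cs cur acc
      = acc.reverse ++ (cur.reverse ++ (pvSplit1 cs).1) :: (pvSplit1 cs).2 := by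
  induction cs with
  | nil =>
      intro fuel cur acc h
      match fuel, h with
      | fuel + 1, _ => simp [PySem.Chars.splitOn.go, pvSplit1]
  | cons c r ih =>
      intro fuel cur acc h
      match fuel, h with
      | fuel + 1, h =>
        by_cases hc : c = '\n'
        · subst hc
          have hpre : List.isPrefixOf ['\n'] ('\n' :: r) = true := by
            simp [List.isPrefixOf]
          rw [PySem.Chars.splitOn.go]
          simp only [hpre, if_true, List.length_cons, List.drop_succ_cons, List.length_nil, List.drop_zero]
          rw [ih fuel [] (cur.reverse :: acc) (by simpa using Nat.lt_of_succ_lt_succ h)]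
          simp [pvSplit1]
        · have hpre : List.isPrefixOf ['\n'] (c :: r) = false := by
            simp [List.isPrefixOf]
            exact fun hcc => hc hcc.symm
          rw [PySem.Chars.splitOn.go]
          rw [if_neg (by simp [hpre])]
          rw [ih fuel (c :: cur) acc (by simpa using Nat.lt_of_succ_lt_succ h)]
          simp [pvSplit1, hc]

theorem pvSplitOn_eq (cs : List Char) :
    PySem.Chars.splitOn cs ['\n'] = (pvSplit1 cs).1 :: (pvSplit1 cs).2 := by
  rw [PySem.Chars.splitOn, pvSplitOnGo_eq cs (cs.length + 1) [] [] (Nat.lt_succ_self _)]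
  simp

-- join ['\n'] with a char consed onto the first piece
theorem pvJoin_cons_first (c : Char) (p : List Char) (ps : List (List Char)) :
    PySem.Chars.join ['\n'] ((c :: p) :: ps) = c :: PySem.Chars.join ['\n'] (p :: ps) := by
  cases ps <;> simp [PySem.Chars.join, List.intercalate]

theorem pvJoin_nil_first (ps : List (List Char)) (h : ps ≠ []) :
    PySem.Chars.join ['\n'] ([] :: ps) = '\n' :: PySem.Chars.join ['\n'] ps := by
  cases ps with
  | nil => exact absurd rfl h
  | cons q qs => simp [PySem.Chars.join, List.intercalate]

-- B's per-segment index loop equals the structural capitalizer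
theorem pvCapGo_eq (seg : List Char) : ∀ (k : Nat), k ≤ seg.length →
    pvCapGo seg (PySem.List.enumerate (seg.drop k) k) = seg.take k ++ pvCapS (seg.drop k) := by
  intro k hk
  induction hd : seg.drop k generalizing k with
  | nil =>
      simp [pvCapGo, PySem.List.enumerate, pvCapS, ← hd]
  | cons ch rest ih =>
      have hklt : k < seg.length := by
        by_contra hge
        simp [List.drop_eq_nil_of_le (Nat.le_of_not_lt hge)] at hd
      have hch : seg[k]'hklt = ch := by
        have h0 : (List.drop k seg)[0]'(by simp [hd]) = ch := by simp [hd]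
        rw [List.getElem_drop] at h0
        simpa using h0
      rw [PySem.List.enumerate_cons]
      by_cases ha : PySem.Chars.isalpha ch = true
      · simp only [pvCapGo, ha, if_true, pvCapS]
        have h1 : PySem.List.slice seg none (some (k : Int)) = seg.take k := by
          simp [pysem, PySem.List.slice_to]
        have h2 : PySem.List.slice seg (some ((k : Int) + 1)) none = seg.drop (k + 1) := by
          have hc1 : ((k : Int) + 1) = ((k + 1 : Nat) : Int) := by push_cast; ring
          rw [hc1, PySem.List.slice_from]
          · simp
          · positivity
        have h3 : seg.drop (k + 1) = rest := by
          rw [← List.drop_drop, hd]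
          simp
        rw [h1, h2, h3]
        simp
      · simp only [pvCapGo, ha, if_false, pvCapS, Bool.false_eq_true]
        have hnext : seg.drop (k + 1) = rest := by
          rw [← List.drop_drop, hd]
          simp
        have hcast : ((k : Int) + 1) = ((k + 1 : Nat) : Int) := by push_cast; ring
        rw [hcast, ih (k + 1) hklt hnext]
        rw [List.take_succ]
        simp [hklt, hch]

theorem pvCapFirst_eq (seg : List Char) : pvCapFirst seg = pvCapS seg := by
  have := pvCapGo_eq seg 0 (Nat.zero_le _)
  simpa [pvCapFirst] using this

-- main bridge: A's flagged loop = join of per-segment capitalization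
theorem pvACap_eq_join (cs : List Char) : ∀ (flag : Bool),
    pvACap cs flag
      = PySem.Chars.join ['\n']
          ((if flag then pvCapS (pvSplit1 cs).1 else (pvSplit1 cs).1) :: (pvSplit1 cs).2.map pvCapS) := by
  induction cs with
  | nil => intro flag; cases flag <;> simp [pvACap, pvSplit1, pvCapS, PySem.Chars.join, List.intercalate]
  | cons c r ih =>
      intro flag
      by_cases hc : c = '\n'
      · subst hc
        have hna : PySem.Chars.isalpha '\n' = false := by decide
        have hL : pvACap ('\n' :: r) flag = '\n' :: pvACap r true := by
          cases flag <;> simp [pvACap, hna]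
        have hsp : pvSplit1 ('\n' :: r) = ([], (pvSplit1 r).1 :: (pvSplit1 r).2) := by
          simp [pvSplit1]
        rw [hL, ih true, hsp]
        cases flag <;> simp [pvCapS, pvJoin_nil_first]
      · have hsp : pvSplit1 (c :: r) = (c :: (pvSplit1 r).1, (pvSplit1 r).2) := by
          simp [pvSplit1, hc]
        cases flag with
        | false =>
            have hL : pvACap (c :: r) false = c :: pvACap r false := by
              simp [pvACap, hc]
            rw [hL, ih false, hsp]
            simp [pvJoin_cons_first]
        | true =>
            by_cases ha : PySem.Chars.isalpha c = true
            · have hL : pvACap (c :: r) true = PySem.Chars.upperChar c :: pvACap r false := by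
                simp [pvACap, hc, ha]
              rw [hL, ih false, hsp]
              simp [pvCapS, ha, pvJoin_cons_first]
            · have hL : pvACap (c :: r) true = c :: pvACap r true := by
                simp [pvACap, hc, ha]
              rw [hL, ih true, hsp]
              simp [pvCapS, ha, pvJoin_cons_first]

-- ===== VERDICT (by name: the statement is the Claim_ definition above) =====
theorem modify_random_prompt_spec : Claim_equal_modify_random_prompt := by
  intro s _
  show _ = _
  unfold modify_random_prompt modify_random_prompt_alt
  rw [pvSplitOn_eq]
  have hmap : ∀ l : List (List Char), l.map pvCapFirst = l.map pvCapS :=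
    fun l => List.map_congr_left (fun x _ => pvCapFirst_eq x)
  simp only [List.map_cons, hmap]
  congr 1
  rw [pvFoldl_eq_pvACap s.toList [] true, pvACap_eq_join s.toList true]
  simp
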